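-- pv_equiv track=rewrite | github.com/XiXiRuPan/SimilarityLearning | sts/augmentation.py | split_and_pad
-- ===== SOURCE A (Python) =====
-- def pad_sent_pair(s1: list, s2: list) -> tuple:
--     if len(s1) == len(s2):
--         return s1, s2
--     elif len(s1) > len(s2):
--         d = len(s2)
--         for i in range(d, len(s1)):
--             s2.append('null')
--     else:
--         d = len(s1)
--         for i in range(d, len(s2)):
--             s1.append('null')
--     return s1, s2
--
-- def pad_sent_triplet(s1: list, s2: list, s3: list) -> tuple:
--     len1, len2, len3 = len(s1), len(s2), len(s3)
--     maxlen = max(len1, len2, len3)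
--     if maxlen == len1:
--         _, s2 = pad_sent_pair(s1, s2)
--         _, s3 = pad_sent_pair(s1, s3)
--     elif maxlen == len2:
--         _, s1 = pad_sent_pair(s2, s1)
--         _, s3 = pad_sent_pair(s2, s3)
--     else:
--         _, s1 = pad_sent_pair(s3, s1)
--         _, s2 = pad_sent_pair(s3, s2)
--     return s1, s2, s3
--
-- def split_and_pad(anchors, positives, negatives):
--     a, p, n = [], [], []
--     for s1, s2, s3 in zip(anchors, positives, negatives):
--         s1pad, s2pad, s3pad = pad_sent_triplet(s1.split(' '), s2.split(' '), s3.split(' '))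
--         a.append(s1pad)
--         p.append(s2pad)
--         n.append(s3pad)
--     return zip(a, p, n)
-- ===== SOURCE B (Python) =====
-- def split_and_pad(anchors, positives, negatives):
--     out = []
--     for s1, s2, s3 in zip(anchors, positives, negatives):
--         ts = (s1.split(' '), s2.split(' '), s3.split(' '))
--         # build the padded triple column by column: column j holds the j-th
--         # token of each sentence, or 'null' once that sentence is exhausted
--         cols = []
--         j = 0
--         while any(j < len(t) for t in ts):
--             cols.append(tuple(t[j] if j < len(t) else 'null' for t in ts))
--             j += 1
--         out.append(([c[0] for c in cols], [c[1] for c in cols], [c[2] for c in cols]))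
--     return out
-- ===== Notes on version B (the rewrite author's own statement) =====
-- stated objective: alternative
-- what changed: Replaces A's branch-on-which-is-longest pairwise padding (pad_sent_triplet/pad_sent_pair mutating and appending 'null' suffixes) with a transposition: for each triplet B walks a column index j while any token list still has a j-th token, emits one column (t[j] or 'null') per step, and transposes the columns back into the three padded rows; no max is computed and no suffix is appended.
import Mathlib
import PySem

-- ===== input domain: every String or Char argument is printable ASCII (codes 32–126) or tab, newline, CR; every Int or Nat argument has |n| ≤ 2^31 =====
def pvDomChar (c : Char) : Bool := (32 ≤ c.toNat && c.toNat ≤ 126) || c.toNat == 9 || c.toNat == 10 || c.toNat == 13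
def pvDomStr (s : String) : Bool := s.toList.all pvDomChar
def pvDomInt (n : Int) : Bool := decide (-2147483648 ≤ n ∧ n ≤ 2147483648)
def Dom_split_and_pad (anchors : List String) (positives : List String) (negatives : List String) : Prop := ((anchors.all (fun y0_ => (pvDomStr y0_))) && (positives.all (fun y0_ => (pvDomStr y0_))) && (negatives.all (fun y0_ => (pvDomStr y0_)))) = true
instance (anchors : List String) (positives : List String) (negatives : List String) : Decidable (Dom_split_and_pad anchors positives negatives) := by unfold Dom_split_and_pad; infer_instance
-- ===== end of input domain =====

-- B replaces A's branch-on-longest pairwise suffix padding by a column-wise transposition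
-- (emit column j = j-th token or 'null' while any list has a j-th token, then transpose back);
-- objective: alternative. Return-value equivalence only (A mutates its fresh split lists internally).

-- ===== PORT A =====
def pad_sent_pair (s1 s2 : List String) : List String × List String :=
  if s1.length = s2.length then (s1, s2)
  else if s1.length > s2.length then
    -- the for-loop appends 'null' once per i in range(len(s2), len(s1))
    (s1, s2 ++ List.replicate (s1.length - s2.length) "null")
  else
    (s1 ++ List.replicate (s2.length - s1.length) "null", s2)

def pad_sent_triplet (s1 s2 s3 : List String) : List String × List String × List String :=
  let maxlen := max s1.length (max s2.length s3.length)
  if maxlen = s1.length then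
    (s1, (pad_sent_pair s1 s2).2, (pad_sent_pair s1 s3).2)
  else if maxlen = s2.length then
    ((pad_sent_pair s2 s1).2, s2, (pad_sent_pair s2 s3).2)
  else
    ((pad_sent_pair s3 s1).2, (pad_sent_pair s3 s2).2, s3)

-- final 'zip(a, p, n)' of the three accumulator lists
def zipAPN : List (List String) → List (List String) → List (List String) → List (List String × List String × List String)
  | x :: xs, y :: ys, z :: zs => (x, y, z) :: zipAPN xs ys zs
  | _, _, _ => []

def split_and_pad (anchors : List String) (positives : List String) (negatives : List String) : List (List String × List String × List String) :=
  let apn := (anchors.zip (positives.zip negatives)).foldl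
    (fun acc t =>
      let pads := pad_sent_triplet ((PySem.Str.split? t.1 " ").getD []) ((PySem.Str.split? t.2.1 " ").getD []) ((PySem.Str.split? t.2.2 " ").getD [])
      (acc.1 ++ [pads.1], acc.2.1 ++ [pads.2.1], acc.2.2 ++ [pads.2.2]))
    (([], [], []) : List (List String) × List (List String) × List (List String))
  zipAPN apn.1 apn.2.1 apn.2.2

-- ===== PORT B =====
-- the while loop of Source B: columns j, j+1, … while any list still has a j-th token
def colsFrom (t1 t2 t3 : List String) (j : Nat) : List (String × String × String) :=
  if j < t1.length ∨ j < t2.length ∨ j < t3.length then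
    ((if j < t1.length then t1.getD j "null" else "null"),
     (if j < t2.length then t2.getD j "null" else "null"),
     (if j < t3.length then t3.getD j "null" else "null")) :: colsFrom t1 t2 t3 (j + 1)
  else []
termination_by max t1.length (max t2.length t3.length) - j
decreasing_by omega

def split_and_pad_alt : List String → List String → List String → List (List String × List String × List String)
  | x :: xs, y :: ys, z :: zs =>
    let cols := colsFrom ((PySem.Str.split? x " ").getD []) ((PySem.Str.split? y " ").getD []) ((PySem.Str.split? z " ").getD []) 0
    (cols.map (·.1), cols.map (·.2.1), cols.map (·.2.2)) :: split_and_pad_alt xs ys zs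
  | _, _, _ => []

-- ===== PRECONDITION & SPEC =====
def Spec_split_and_pad (anchors : List String) (positives : List String) (negatives : List String) (out : List (List String × List String × List String)) : Prop := out = split_and_pad_alt anchors positives negatives
instance (anchors : List String) (positives : List String) (negatives : List String) (out : List (List String × List String × List String)) : Decidable (Spec_split_and_pad anchors positives negatives out) := by unfold Spec_split_and_pad; infer_instance

-- ===== CLAIM (what is proved, stated in full; the proofs are below) =====
def Claim_equal_split_and_pad : Prop := ∀ (anchors : List String) (positives : List String) (negatives : List String), Dom_split_and_pad anchors positives negatives → Spec_split_and_pad anchors positives negatives (split_and_pad anchors positives negatives)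

-- ===== LEMMAS AND PROOFS =====

-- from-suffix-padding view of A's helpers (proof-only)
def padTo (m : Nat) (t : List String) : List String :=
  t ++ List.replicate (m - t.length) "null"

theorem pad_pair_snd (s1 s2 : List String) (h : s2.length ≤ s1.length) :
    (pad_sent_pair s1 s2).2 = padTo s1.length s2 := by
  unfold pad_sent_pair padTo
  split_ifs with h1 h2
  · simp [h1]
  · rfl
  · omega

theorem pad_triplet_eq (s1 s2 s3 : List String) :
    pad_sent_triplet s1 s2 s3 =
      (padTo (max s1.length (max s2.length s3.length)) s1,
       padTo (max s1.length (max s2.length s3.length)) s2,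
       padTo (max s1.length (max s2.length s3.length)) s3) := by
  unfold pad_sent_triplet
  dsimp only
  have hself : ∀ (m : Nat) (t : List String), m = t.length → padTo m t = t := by
    intro m t hm; simp [padTo, hm]
  split_ifs with h1 h2
  · rw [pad_pair_snd s1 s2 (by omega), pad_pair_snd s1 s3 (by omega), h1, hself _ _ rfl]
  · rw [pad_pair_snd s2 s1 (by omega), pad_pair_snd s2 s3 (by omega), h2, hself _ _ rfl]
  · have h3 : max s1.length (max s2.length s3.length) = s3.length := by omega
    rw [pad_pair_snd s3 s1 (by omega), pad_pair_snd s3 s2 (by omega), h3, hself _ _ rfl]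

-- step functions of the two per-triplet computations
def aStep (t : String × String × String) : List String × List String × List String :=
  pad_sent_triplet ((PySem.Str.split? t.1 " ").getD []) ((PySem.Str.split? t.2.1 " ").getD []) ((PySem.Str.split? t.2.2 " ").getD [])

-- characterise A's foldl accumulator
theorem foldl_apn (l : List (String × String × String))
    (a p n : List (List String)) :
    (l.foldl (fun acc t =>
        let pads := pad_sent_triplet ((PySem.Str.split? t.1 " ").getD []) ((PySem.Str.split? t.2.1 " ").getD []) ((PySem.Str.split? t.2.2 " ").getD [])
        (acc.1 ++ [pads.1], acc.2.1 ++ [pads.2.1], acc.2.2 ++ [pads.2.2])) (a, p, n)) =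
      (a ++ l.map (fun t => (aStep t).1),
       p ++ l.map (fun t => (aStep t).2.1),
       n ++ l.map (fun t => (aStep t).2.2)) := by
  induction l generalizing a p n with
  | nil => simp
  | cons hd tl ih => simp [ih, aStep]

theorem zipAPN_maps (l : List (String × String × String)) :
    zipAPN (l.map (fun t => (aStep t).1)) (l.map (fun t => (aStep t).2.1))
      (l.map (fun t => (aStep t).2.2)) = l.map (fun t => aStep t) := by
  induction l with
  | nil => rfl
  | cons hd tl ih => simp [zipAPN, ih]

-- the column list, as an index range
theorem colsFrom_aux (t1 t2 t3 : List String) (n j : Nat)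
    (hn : max t1.length (max t2.length t3.length) - j = n) :
    colsFrom t1 t2 t3 j =
      (List.range' j n).map
        (fun i => ((if i < t1.length then t1.getD i "null" else "null"),
                   (if i < t2.length then t2.getD i "null" else "null"),
                   (if i < t3.length then t3.getD i "null" else "null"))) := by
  induction n generalizing j with
  | zero =>
    rw [colsFrom]
    have : ¬ (j < t1.length ∨ j < t2.length ∨ j < t3.length) := by omega
    simp [this]
  | succ k ih =>
    rw [colsFrom]
    have hlt : j < t1.length ∨ j < t2.length ∨ j < t3.length := by omega
    have hr : List.range' j (k + 1) = j :: List.range' (j + 1) k := by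
      simp [List.range'_succ]
    simp only [if_pos hlt, ih (j + 1) (by omega), hr, List.map_cons]

theorem colsFrom_eq_range (t1 t2 t3 : List String) (j : Nat) :
    colsFrom t1 t2 t3 j =
      (List.range' j (max t1.length (max t2.length t3.length) - j)).map
        (fun i => ((if i < t1.length then t1.getD i "null" else "null"),
                   (if i < t2.length then t2.getD i "null" else "null"),
                   (if i < t3.length then t3.getD i "null" else "null"))) :=
  colsFrom_aux t1 t2 t3 _ j rfl

-- a projection of the column list is the padded row
theorem range_map_padTo (t : List String) (M : Nat) (h : t.length ≤ M) :
    (List.range' 0 M).map (fun i => if i < t.length then t.getD i "null" else "null")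
      = padTo M t := by
  apply List.ext_getElem
  · simp [padTo]; omega
  · intro i hi1 hi2
    simp only [List.getElem_map, List.getElem_range', padTo]
    by_cases hc : i < t.length
    · simp [hc, List.getD]
    · have : i - t.length < M - t.length := by simp [padTo] at hi2; omega
      simp [hc, List.getElem_append_right (by omega : t.length ≤ i), List.getElem_replicate]

theorem bStep_eq_aStep (t : String × String × String) :
    (let t1 := (PySem.Str.split? t.1 " ").getD []
     let t2 := (PySem.Str.split? t.2.1 " ").getD []
     let t3 := (PySem.Str.split? t.2.2 " ").getD []
     let cols := colsFrom t1 t2 t3 0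
     ((cols.map (·.1), cols.map (·.2.1), cols.map (·.2.2)) :
       List String × List String × List String)) = aStep t := by
  dsimp only
  set t1 := (PySem.Str.split? t.1 " ").getD []
  set t2 := (PySem.Str.split? t.2.1 " ").getD []
  set t3 := (PySem.Str.split? t.2.2 " ").getD []
  set M := max t1.length (max t2.length t3.length) with hM
  rw [aStep, pad_triplet_eq, colsFrom_eq_range]
  simp only [Nat.sub_zero, List.map_map, ← hM]
  refine Prod.ext ?_ (Prod.ext ?_ ?_) <;> dsimp only [Function.comp] <;>
    [exact range_map_padTo t1 M (by omega); exact range_map_padTo t2 M (by omega);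
     exact range_map_padTo t3 M (by omega)]

theorem alt_eq_map (anchors positives negatives : List String) :
    split_and_pad_alt anchors positives negatives =
      (anchors.zip (positives.zip negatives)).map (fun t => aStep t) := by
  induction anchors generalizing positives negatives with
  | nil => rfl
  | cons x xs ih =>
    cases positives with
    | nil => rfl
    | cons y ys =>
      cases negatives with
      | nil => rfl
      | cons z zs =>
        simp only [split_and_pad_alt, List.zip_cons_cons, List.map_cons, ih]
        congr 1
        exact bStep_eq_aStep (x, y, z)

-- ===== VERDICT (by name: the statement is the Claim_ definition above) =====
theorem split_and_pad_spec : Claim_equal_split_and_pad := by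
  intro anchors positives negatives _
  unfold Spec_split_and_pad split_and_pad
  rw [foldl_apn, alt_eq_map]
  simpa using zipAPN_maps (anchors.zip (positives.zip negatives))
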